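/- GENERATED by farm/mkstatement.py from design/units.tsv (unit `stb_vorbis_get_file_offset`) and the Specs of Vorbis/Spec/*.lean — do not edit.
   THE STATEMENT of the proof unit `stb_vorbis_get_file_offset`: the function `stb_vorbis_get_file_offset` (15 instructions) satisfies its contract,
   given the contracts of its callees. What the names mean: Vorbis/Spec/Basic.lean. The theorem to prove:
   `theorem stb_vorbis_get_file_offset_ok : Vorbis.Spec.stb_vorbis_get_file_offset.Statement`. -/
import Vorbis.Spec.Alloc
namespace Vorbis.Spec.stb_vorbis_get_file_offset
open X86 X86.User Asan

/-- The statement of unit `stb_vorbis_get_file_offset`. -/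
def Statement : Prop :=
  ∀ (Lay : Layout) (_hLay : Lay.hi = 0x1000000) (μ : Microarch) (_hμ : UserX.MicroOK μ) (u₀ : State)
    (_hcode : HasCodeNat Lay u₀ Vorbis.L.stb_vorbis_get_file_offset.entry Vorbis.Code.code_stb_vorbis_get_file_offset.nat Vorbis.L.stb_vorbis_get_file_offset.size)
    (_h_asan_load8_noabort : Asan.SmallCheck Lay μ Vorbis.WayInv (Vorbis.CodeOK u₀) [.rax, .rcx, .rdx] 8 Vorbis.L.__asan_load8_noabort.entry),
    ∀ (others : List Obj) (frames : List (Nat × FrameLayout)), Calls Lay μ Vorbis.WayInv (Vorbis.conv u₀) Vorbis.L.stb_vorbis_get_file_offset.entry (Vorbis.Spec.stb_vorbis_get_file_offset.spec others frames)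

end Vorbis.Spec.stb_vorbis_get_file_offset
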